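-- pv_equiv track=rewrite | github.com/bminaiev/ICFPC2024 | roma/t4.py | extract_lambda_body
-- ===== SOURCE A (Python) =====
-- def extract_lambda_body(tokens):
--     # A helper function to extract the lambda body until the matching scope ends
--     depth = 1
--     body_tokens = []
--     while depth > 0 and tokens:
--         token = tokens.pop(0)
--         body_tokens.append(token)
--         if token.startswith('L'):
--             depth += 0
--         elif token.startswith('B'):
--             depth += 1
--         elif token.startswith('?'):
--             depth += 2
--         else:
--             depth -= 1
--     return body_tokens
-- ===== SOURCE B (Python) =====
-- def extract_lambda_body(tokens):
--     # Two stages: map each token to its depth delta, then scan the deltas for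
--     # the first point where the running depth reaches 0; one slice + one del.
--     deltas = [0 if t.startswith('L') else
--               1 if t.startswith('B') else
--               2 if t.startswith('?') else -1 for t in tokens]
--     end = len(tokens)
--     depth = 1
--     for i, d in enumerate(deltas):
--         depth += d
--         if depth <= 0:
--             end = i + 1
--             break
--     body = tokens[:end]
--     del tokens[:end]
--     return body
-- ===== Notes on version B (the rewrite author's own statement) =====
-- stated objective: alternative
-- what changed: Replaced the pop(0)-per-token consume loop by a two-stage pipeline: map every token to a depth delta, scan the deltas for the first prefix reaching depth 0, then a single slice and del; note the up-front map touches the whole list, so it is not faster when the scope ends early.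
import Mathlib
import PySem

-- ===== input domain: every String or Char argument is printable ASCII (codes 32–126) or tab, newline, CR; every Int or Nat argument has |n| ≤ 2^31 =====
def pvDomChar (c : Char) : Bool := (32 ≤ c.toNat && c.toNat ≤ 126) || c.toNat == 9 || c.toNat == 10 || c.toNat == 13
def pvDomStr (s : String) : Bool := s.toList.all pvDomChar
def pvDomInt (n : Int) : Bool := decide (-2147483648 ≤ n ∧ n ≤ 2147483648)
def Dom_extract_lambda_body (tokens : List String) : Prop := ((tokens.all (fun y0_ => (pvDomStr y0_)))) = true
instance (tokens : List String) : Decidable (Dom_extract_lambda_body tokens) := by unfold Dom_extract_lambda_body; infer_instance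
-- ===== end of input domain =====

-- B replaces A's pop(0)-and-append loop by a map of tokens to depth deltas plus a scan for the
-- first prefix reaching depth 0, then one slice. Both A and B consume the returned prefix from
-- the caller's list in place; the theorems are about the return value only.

-- ===== PORT A =====
-- A's while loop: pop the head, append it to body_tokens, update depth.
def extract_lambda_body_goA (depth : Int) (tokens : List String) (acc : List String) : List String :=
  match tokens with
  | [] => acc
  | t :: rest =>
    if depth > 0 then
      extract_lambda_body_goA
        (if PySem.Str.startswith t "L" then depth + 0
         else if PySem.Str.startswith t "B" then depth + 1
         else if PySem.Str.startswith t "?" then depth + 2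
         else depth - 1)
        rest (acc ++ [t])
    else acc

def extract_lambda_body (tokens : List String) : List String :=
  extract_lambda_body_goA 1 tokens []

-- ===== PORT B =====
-- B stage 1: the per-token depth delta (the list comprehension).
def extract_lambda_body_delta (t : String) : Int :=
  if PySem.Str.startswith t "L" then 0
  else if PySem.Str.startswith t "B" then 1
  else if PySem.Str.startswith t "?" then 2
  else -1

-- B stage 2: scan the deltas, returning the end index of the body (len(tokens) if depth never drops).
def extract_lambda_body_end (ds : List Int) (depth : Int) : Nat :=
  match ds with
  | [] => 0
  | d :: rest => if depth + d ≤ 0 then 1 else 1 + extract_lambda_body_end rest (depth + d)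

def extract_lambda_body_alt (tokens : List String) : List String :=
  tokens.take (extract_lambda_body_end (tokens.map extract_lambda_body_delta) 1)

-- ===== PRECONDITION & SPEC =====
def Spec_extract_lambda_body (tokens : List String) (out : List String) : Prop := out = extract_lambda_body_alt tokens
instance (tokens : List String) (out : List String) : Decidable (Spec_extract_lambda_body tokens out) := by unfold Spec_extract_lambda_body; infer_instance

-- ===== CLAIM (what is proved, stated in full; the proofs are below) =====
def Claim_equal_extract_lambda_body : Prop := ∀ (tokens : List String), Dom_extract_lambda_body tokens → Spec_extract_lambda_body tokens (extract_lambda_body tokens)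

-- ===== LEMMAS AND PROOFS =====
theorem extract_lambda_body_goA_stop (tokens acc : List String) (depth : Int) (h : ¬ depth > 0) :
    extract_lambda_body_goA depth tokens acc = acc := by
  cases tokens <;> simp [extract_lambda_body_goA, h]

theorem extract_lambda_body_goA_eq (tokens : List String) :
    ∀ (depth : Int) (acc : List String), depth > 0 →
      extract_lambda_body_goA depth tokens acc
        = acc ++ tokens.take (extract_lambda_body_end (tokens.map extract_lambda_body_delta) depth) := by
  induction tokens with
  | nil => intro depth acc _; simp [extract_lambda_body_goA, extract_lambda_body_end]
  | cons t rest ih =>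
    intro depth acc hd
    have hstep : extract_lambda_body_goA depth (t :: rest) acc
        = extract_lambda_body_goA (depth + extract_lambda_body_delta t) rest (acc ++ [t]) := by
      simp only [extract_lambda_body_goA, hd, if_pos, extract_lambda_body_delta]
      congr 1
      split_ifs <;> ring
    by_cases hnext : depth + extract_lambda_body_delta t > 0
    · rw [hstep, ih _ _ hnext]
      have : ¬ depth + extract_lambda_body_delta t ≤ 0 := by omega
      simp [extract_lambda_body_end, this, Nat.add_comm]
    · rw [hstep, extract_lambda_body_goA_stop _ _ _ hnext]
      have : depth + extract_lambda_body_delta t ≤ 0 := by omega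
      simp [extract_lambda_body_end, this]

-- ===== VERDICT (by name: the statement is the Claim_ definition above) =====
theorem extract_lambda_body_spec : Claim_equal_extract_lambda_body := by
  intro tokens _
  unfold Spec_extract_lambda_body extract_lambda_body extract_lambda_body_alt
  simpa using extract_lambda_body_goA_eq tokens 1 [] (by norm_num)
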